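-- pv_equiv track=rewrite | github.com/Akinetri/PhysTech-Programming | 3.5.py | count_salutes
-- ===== SOURCE A (Python) =====
-- def count_salutes(s):
--     count_rights = 0
--     total_salutes = 0
--
--     for char in s:
--         if char == '>':
--             count_rights += 1
--         elif char == '<':
--             total_salutes += 2 * count_rights
--
--     return total_salutes
-- ===== SOURCE B (Python) =====
-- def count_salutes(s):
--     # Divide and conquer: for a segment return (rights, lefts, salutes);
--     # combining halves adds 2 * rights(left half) * lefts(right half)
--     # cross-pairs, since every '>' on the left salutes every '<' on the right.
--     def solve(lo, hi):
--         if hi - lo == 0: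
--             return (0, 0, 0)
--         if hi - lo == 1:
--             c = s[lo]
--             if c == '>':
--                 return (1, 0, 0)
--             if c == '<':
--                 return (0, 1, 0)
--             return (0, 0, 0)
--         mid = (lo + hi) // 2
--         r1, l1, t1 = solve(lo, mid)
--         r2, l2, t2 = solve(mid, hi)
--         return (r1 + r2, l1 + l2, t1 + t2 + 2 * r1 * l2)
--     return solve(0, len(s))[2]
-- ===== Notes on version B (the rewrite author's own statement) =====
-- stated objective: alternative
-- what changed: Replaces A's single left-to-right running-counter loop by a divide-and-conquer recursion: each half returns (rights, lefts, salutes) and halves combine with 2*rights(left)*lefts(right) cross-pairs.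
import Mathlib
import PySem

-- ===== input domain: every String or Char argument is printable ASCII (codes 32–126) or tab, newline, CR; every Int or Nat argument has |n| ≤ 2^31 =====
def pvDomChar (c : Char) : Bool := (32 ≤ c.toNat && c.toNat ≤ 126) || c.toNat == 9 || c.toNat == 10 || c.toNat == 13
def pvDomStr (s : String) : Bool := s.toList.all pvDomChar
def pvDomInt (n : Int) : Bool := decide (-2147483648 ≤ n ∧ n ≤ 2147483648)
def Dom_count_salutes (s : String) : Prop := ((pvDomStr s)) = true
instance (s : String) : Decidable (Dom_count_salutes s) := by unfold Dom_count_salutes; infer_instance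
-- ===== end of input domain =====

-- B replaces A's single running-counter scan by a divide-and-conquer recursion combining (rights, lefts, salutes) triples of the two halves (alternative decomposition, same cost).

-- ===== PORT A =====
def count_salutes (s : String) : Int :=
  (s.toList.foldl
    (fun st ch =>
      if ch = '>' then (st.1 + 1, st.2)
      else if ch = '<' then (st.1, st.2 + 2 * st.1)
      else st)
    ((0 : Int), (0 : Int))).2

-- ===== PORT B =====
-- recursion on the segment (here: the list), splitting at the midpoint as Source B does
def solveB (l : List Char) : Int × Int × Int :=
  if l.length = 0 then (0, 0, 0)
  else if l.length = 1 then
    match l with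
    | [] => (0, 0, 0)
    | c :: _ =>
      if c = '>' then (1, 0, 0)
      else if c = '<' then (0, 1, 0)
      else (0, 0, 0)
  else
    let m := l.length / 2
    let a := solveB (l.take m)
    let b := solveB (l.drop m)
    (a.1 + b.1, a.2.1 + b.2.1, a.2.2 + b.2.2 + 2 * a.1 * b.2.1)
termination_by l.length
decreasing_by
  · simp only [List.length_take]
    omega
  · simp only [List.length_drop]
    omega

def count_salutes_alt (s : String) : Int := (solveB s.toList).2.2

-- ===== PRECONDITION & SPEC =====
def Spec_count_salutes (s : String) (out : Int) : Prop := out = count_salutes_alt s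
instance (s : String) (out : Int) : Decidable (Spec_count_salutes s out) := by unfold Spec_count_salutes; infer_instance

-- ===== CLAIM (what is proved, stated in full; the proofs are below) =====
def Claim_equal_count_salutes : Prop := ∀ (s : String), Dom_count_salutes s → Spec_count_salutes s (count_salutes s)

-- ===== LEMMAS AND PROOFS =====

-- reference quantities: count of '>', count of '<', and the salute total
def cntR (l : List Char) : Int := l.foldr (fun c a => (if c = '>' then 1 else 0) + a) 0
def cntL (l : List Char) : Int := l.foldr (fun c a => (if c = '<' then 1 else 0) + a) 0
def sal : List Char → Int
  | [] => 0
  | c :: l => (if c = '>' then 2 * cntL l else 0) + sal l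

theorem cntR_append (x y : List Char) : cntR (x ++ y) = cntR x + cntR y := by
  induction x with
  | nil => simp [cntR]
  | cons c x ih => simp [cntR, List.foldr] at ih ⊢; omega

theorem cntL_append (x y : List Char) : cntL (x ++ y) = cntL x + cntL y := by
  induction x with
  | nil => simp [cntL]
  | cons c x ih => simp [cntL, List.foldr] at ih ⊢; omega

theorem sal_append (x y : List Char) :
    sal (x ++ y) = sal x + sal y + 2 * cntR x * cntL y := by
  induction x with
  | nil => simp [sal, cntR]
  | cons c x ih =>
    simp only [List.cons_append, sal, ih, cntL_append, cntR]
    by_cases h : c = '>' <;> simp [h] <;> ring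

theorem loopA_eq (l : List Char) (r t : Int) :
    (l.foldl
      (fun st ch =>
        if ch = '>' then (st.1 + 1, st.2)
        else if ch = '<' then (st.1, st.2 + 2 * st.1)
        else st)
      (r, t)) = (r + cntR l, t + sal l + 2 * r * cntL l) := by
  induction l generalizing r t with
  | nil => simp [cntR, sal, cntL]
  | cons c l ih =>
    simp only [List.foldl_cons]
    by_cases h1 : c = '>'
    · simp [h1, ih, cntR, cntL, sal, Prod.ext_iff]
      exact ⟨by ring, by ring⟩
    · by_cases h2 : c = '<'
      · simp [h1, h2, ih, cntR, cntL, sal, Prod.ext_iff]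
        ring
      · simp [h1, h2, ih, cntR, cntL, sal, Prod.ext_iff]

theorem solveB_eq_aux (n : Nat) : ∀ l : List Char, l.length ≤ n → solveB l = (cntR l, cntL l, sal l) := by
  induction n with
  | zero =>
    intro l h
    have hl : l = [] := by cases l <;> simp_all
    subst hl
    rw [solveB.eq_def]; simp [cntR, cntL, sal]
  | succ n ih =>
    intro l h
    by_cases h0 : l.length = 0
    · have hl : l = [] := List.eq_nil_of_length_eq_zero h0
      subst hl
      rw [solveB.eq_def]; simp [cntR, cntL, sal]
    · by_cases h1 : l.length = 1
      · match l, h1 with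
        | [c], _ =>
          rw [solveB.eq_def]
          by_cases hc : c = '>' <;> by_cases hd : c = '<' <;>
            simp [hc, hd, cntR, cntL, sal]
      · rw [solveB.eq_def]
        simp only [h0, h1, if_false]
        rw [ih (l.take (l.length / 2)) (by simp; omega),
            ih (l.drop (l.length / 2)) (by simp; omega)]
        have e1 := cntR_append (l.take (l.length / 2)) (l.drop (l.length / 2))
        have e2 := cntL_append (l.take (l.length / 2)) (l.drop (l.length / 2))
        have e3 := sal_append (l.take (l.length / 2)) (l.drop (l.length / 2))
        rw [List.take_append_drop] at e1 e2 e3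
        simp only [Prod.mk.injEq]
        omega

theorem solveB_eq (l : List Char) : solveB l = (cntR l, cntL l, sal l) :=
  solveB_eq_aux l.length l le_rfl

-- ===== VERDICT (by name: the statement is the Claim_ definition above) =====
theorem count_salutes_spec : Claim_equal_count_salutes := by
  intro s _
  unfold Spec_count_salutes count_salutes count_salutes_alt
  rw [loopA_eq, solveB_eq]
  simp
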